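-- pv_equiv track=rewrite | github.com/An-20/advent-of-code-2022 | day8/a.py | check_visibility
-- ===== SOURCE A (Python) =====
-- def check_visibility(x, r=True):
--     visibility = []
--     for old_row in x:
--         new_row = []
--         tallest = -1
--         for height in (old_row if r else reversed(old_row)):
--             if height > tallest:
--                 new_row.append(True)
--                 tallest = height
--             else:
--                 new_row.append(False)
--         if not r:
--             new_row.reverse()
--         visibility.append(new_row)
--     return visibility
-- ===== SOURCE B (Python) =====
-- def check_visibility(x, r=True):
--     result = []
--     for row in x:
--         if r:
--             result.append([row[i] > max([-1] + row[:i]) for i in range(len(row))])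
--         else:
--             result.append([row[i] > max([-1] + row[i+1:]) for i in range(len(row))])
--     return result
-- ===== Notes on version B (the rewrite author's own statement) =====
-- stated objective: idiomatic
-- what changed: Replaces the running-max scan (with explicit reversal for r=False) by the direct per-cell definition: cell i is visible iff it exceeds max of the prefix row[:i] (r=True) or of the suffix row[i+1:] (r=False), with default=-1.
import Mathlib
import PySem

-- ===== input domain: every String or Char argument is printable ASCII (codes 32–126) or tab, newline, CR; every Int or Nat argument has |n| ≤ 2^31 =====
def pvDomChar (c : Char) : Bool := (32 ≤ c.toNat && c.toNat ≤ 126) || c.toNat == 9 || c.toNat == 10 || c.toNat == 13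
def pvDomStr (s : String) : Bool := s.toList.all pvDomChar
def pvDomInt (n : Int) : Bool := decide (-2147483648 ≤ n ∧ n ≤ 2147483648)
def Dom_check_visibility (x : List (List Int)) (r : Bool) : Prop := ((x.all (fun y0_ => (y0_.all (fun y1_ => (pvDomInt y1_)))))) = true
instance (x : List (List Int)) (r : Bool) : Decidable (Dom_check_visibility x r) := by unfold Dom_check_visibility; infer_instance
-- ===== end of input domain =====

-- B replaces A's running-max scan (with reversal for r=False) by the direct per-cell
-- definition: cell i is visible iff it exceeds max([-1] + prefix) resp. max([-1] + suffix)
-- (objective: idiomatic; not faster).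

-- ===== PORT A =====
-- inner loop of A: running maximum `tallest`, appending one Bool per height
def scanRowA : Int → List Int → List Bool
  | _, [] => []
  | tallest, h :: hs =>
    if h > tallest then true :: scanRowA h hs else false :: scanRowA tallest hs

def check_visibility (x : List (List Int)) (r : Bool) : List (List Bool) :=
  x.map (fun oldRow =>
    if r then scanRowA (-1) oldRow
    else (scanRowA (-1) oldRow.reverse).reverse)

-- ===== PORT B =====
-- max([-1] + xs) in Python = left fold of max with initial value -1
def pymaxNeg1 (xs : List Int) : Int := xs.foldl max (-1)

def check_visibility_alt (x : List (List Int)) (r : Bool) : List (List Bool) :=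
  x.map (fun row =>
    if r then (List.range row.length).map
      (fun i => decide (row.getD i 0 > pymaxNeg1 (row.take i)))
    else (List.range row.length).map
      (fun i => decide (row.getD i 0 > pymaxNeg1 (row.drop (i + 1)))))

-- ===== PRECONDITION & SPEC =====
def Spec_check_visibility (x : List (List Int)) (r : Bool) (out : List (List Bool)) : Prop := out = check_visibility_alt x r
instance (x : List (List Int)) (r : Bool) (out : List (List Bool)) : Decidable (Spec_check_visibility x r out) := by unfold Spec_check_visibility; infer_instance

-- ===== CLAIM (what is proved, stated in full; the proofs are below) =====
def Claim_equal_check_visibility : Prop := ∀ (x : List (List Int)) (r : Bool), Dom_check_visibility x r → Spec_check_visibility x r (check_visibility x r)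

-- ===== LEMMAS AND PROOFS =====

theorem scanRowA_cons (t h : Int) (hs : List Int) :
    scanRowA t (h :: hs) = decide (h > t) :: scanRowA (max t h) hs := by
  by_cases hc : h > t
  · simp [scanRowA, hc, max_eq_right (le_of_lt hc)]
  · simp [scanRowA, hc, max_eq_left (le_of_not_gt hc)]

theorem foldl_max_pull (l : List Int) (a b : Int) :
    l.foldl max (max a b) = max (l.foldl max a) b := by
  induction l generalizing a with
  | nil => simp
  | cons h t ih =>
    simp only [List.foldl_cons]
    rw [max_right_comm a b h, ih]

theorem foldl_max_reverse (l : List Int) (a : Int) :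
    l.reverse.foldl max a = l.foldl max a := by
  induction l generalizing a with
  | nil => simp
  | cons h t ih =>
    simp only [List.reverse_cons, List.foldl_append, List.foldl_cons, List.foldl_nil,
      List.foldl_cons]
    rw [ih, ← foldl_max_pull]

-- the running-max scan equals the per-index prefix-max characterisation
theorem scanRowA_eq_prefix (row : List Int) (t : Int) :
    scanRowA t row =
      (List.range row.length).map (fun i => decide (row.getD i 0 > (row.take i).foldl max t)) := by
  induction row generalizing t with
  | nil => simp [scanRowA]
  | cons h hs ih =>
    rw [scanRowA_cons, ih (max t h)]
    simp only [List.length_cons, List.range_succ_eq_map, List.map_cons, List.map_map]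
    congr 1

theorem range_reverse_eq (n : Nat) :
    (List.range n).reverse = (List.range n).map (fun i => n - 1 - i) := by
  apply List.ext_getElem
  · simp
  · intro i h1 h2
    rw [List.getElem_reverse]
    simp only [List.getElem_map, List.getElem_range, List.length_range]

theorem scanRowA_reverse (row : List Int) :
    (scanRowA (-1) row.reverse).reverse =
      (List.range row.length).map
        (fun i => decide (row.getD i 0 > (row.drop (i + 1)).foldl max (-1))) := by
  rw [scanRowA_eq_prefix, ← List.map_reverse, List.length_reverse, range_reverse_eq,
    List.map_map]
  apply List.map_congr_left
  intro i hi
  rw [List.mem_range] at hi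
  simp only [Function.comp]
  have h1 : row.reverse.getD (row.length - 1 - i) 0 = row.getD i 0 := by
    rw [List.getD_eq_getElem _ _ (by simp; omega), List.getD_eq_getElem _ _ hi,
      List.getElem_reverse]
    simp only [show row.length - 1 - (row.length - 1 - i) = i from by omega]
  have h2 : List.take (row.length - 1 - i) row.reverse = (row.drop (i + 1)).reverse := by
    rw [List.take_reverse, show row.length - (row.length - 1 - i) = i + 1 from by omega]
  rw [h1, h2, foldl_max_reverse]

-- ===== VERDICT (by name: the statement is the Claim_ definition above) =====
theorem check_visibility_spec : Claim_equal_check_visibility := by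
  intro x r _
  unfold Spec_check_visibility check_visibility check_visibility_alt
  apply List.map_congr_left
  intro row _
  cases r with
  | false => simpa [pymaxNeg1] using scanRowA_reverse row
  | true => simpa [pymaxNeg1] using scanRowA_eq_prefix row (-1)
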